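-- pv_equiv track=rewrite | github.com/riscv/riscv-arch-test | working-testplans/process_norm_rules.py | extract_variant_reference
-- ===== SOURCE A (Python) =====
-- def extract_variant_reference(adoc_text: str) -> str:
--     """Extract the variant reference section (lines about nv0, emul2, etc.)."""
--     lines = adoc_text.split("\n")
--     variant_lines = []
--     capture = False
--     for line in lines:
--         if "an x in the spreadsheet" in line:
--             capture = True
--         if capture:
--             variant_lines.append(line)
--     return "\n".join(variant_lines) if variant_lines else "(No variant reference found)"
-- ===== SOURCE B (Python) =====
-- def extract_variant_reference(adoc_text: str) -> str:
--     """Extract the variant reference section (lines about nv0, emul2, etc.)."""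
--     lines = adoc_text.split("\n")
--     idx = next((i for i, line in enumerate(lines) if "an x in the spreadsheet" in line), None)
--     if idx is None:
--         return "(No variant reference found)"
--     return "\n".join(lines[idx:])
-- ===== Notes on version B (the rewrite author's own statement) =====
-- stated objective: simpler
-- what changed: Replaces the running capture-flag fold that accumulates lines one by one with locating the first marker line's index and joining the tail slice of the line list.
import Mathlib
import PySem

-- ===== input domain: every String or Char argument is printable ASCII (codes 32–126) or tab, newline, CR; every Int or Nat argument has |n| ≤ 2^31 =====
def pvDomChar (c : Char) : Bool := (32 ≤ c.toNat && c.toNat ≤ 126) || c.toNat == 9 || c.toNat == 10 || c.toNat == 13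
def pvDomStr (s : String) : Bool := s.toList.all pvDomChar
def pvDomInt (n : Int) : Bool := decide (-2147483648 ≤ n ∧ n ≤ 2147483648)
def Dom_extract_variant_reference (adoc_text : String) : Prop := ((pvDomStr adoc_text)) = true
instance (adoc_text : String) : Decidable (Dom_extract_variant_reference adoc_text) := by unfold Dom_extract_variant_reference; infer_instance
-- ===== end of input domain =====

-- B replaces A's running capture-flag fold with find-first-marker-index + join of the tail (simpler decomposition).


-- ===== PORT A =====
-- the marker test shared by both ports: "an x in the spreadsheet" in line
def evrHit (line : String) : Bool := PySem.Str.isIn "an x in the spreadsheet" line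

-- one iteration of A's loop body: update the capture flag, then conditionally append the line
def evrStep (st : List String × Bool) (line : String) : List String × Bool :=
  let capture := if evrHit line then true else st.2
  (if capture then st.1 ++ [line] else st.1, capture)

def extract_variant_reference (adoc_text : String) : String :=
  let lines := (PySem.Str.split? adoc_text "\n").getD []  -- split? is some: sep "\n" ≠ ""
  let res := lines.foldl evrStep ([], false)
  if res.1.isEmpty then "(No variant reference found)" else PySem.Str.join "\n" res.1

-- ===== PORT B =====
def extract_variant_reference_alt (adoc_text : String) : String :=
  let lines := (PySem.Str.split? adoc_text "\n").getD []  -- split? is some: sep "\n" ≠ ""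
  match lines.findIdx? evrHit with
  | none   => "(No variant reference found)"
  | some i => PySem.Str.join "\n" (lines.drop i)

-- ===== PRECONDITION & SPEC =====
def Spec_extract_variant_reference (adoc_text : String) (out : String) : Prop := out = extract_variant_reference_alt adoc_text
instance (adoc_text : String) (out : String) : Decidable (Spec_extract_variant_reference adoc_text out) := by unfold Spec_extract_variant_reference; infer_instance

-- ===== CLAIM (what is proved, stated in full; the proofs are below) =====
def Claim_equal_extract_variant_reference : Prop := ∀ (adoc_text : String), Dom_extract_variant_reference adoc_text → Spec_extract_variant_reference adoc_text (extract_variant_reference adoc_text)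

-- ===== LEMMAS AND PROOFS =====
-- once the capture flag is true it stays true and every remaining line is appended
theorem evr_fold_true (lines : List String) (acc : List String) :
    lines.foldl evrStep (acc, true) = (acc ++ lines, true) := by
  induction lines generalizing acc with
  | nil => simp
  | cons l rest ih =>
    simp only [List.foldl_cons]
    rw [show evrStep (acc, true) l = (acc ++ [l], true) from by simp [evrStep]]
    rw [ih]; simp

-- the fold from the initial state is determined by the index of the first marker line
theorem evr_fold_false (lines : List String) :
    lines.foldl evrStep ([], false) =
      match lines.findIdx? evrHit with
      | none   => ([], false)
      | some i => (lines.drop i, true) := by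
  induction lines with
  | nil => simp
  | cons l rest ih =>
    simp only [List.foldl_cons, List.findIdx?_cons]
    by_cases h : evrHit l
    · rw [show evrStep ([], false) l = ([l], true) from by simp [evrStep, h]]
      rw [evr_fold_true]
      simp [h]
    · rw [show evrStep ([], false) l = ([], false) from by simp [evrStep, h]]
      rw [ih]
      simp only [Bool.not_eq_true] at h
      simp only [h]
      cases rest.findIdx? evrHit <;> simp

-- both ports, as functions of the split line list, agree
theorem evr_main (lines : List String) :
    (if (lines.foldl evrStep ([], false)).1.isEmpty then "(No variant reference found)"
     else PySem.Str.join "\n" (lines.foldl evrStep ([], false)).1) =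
    (match lines.findIdx? evrHit with
     | none   => "(No variant reference found)"
     | some i => PySem.Str.join "\n" (lines.drop i)) := by
  rw [evr_fold_false]
  cases hfi : lines.findIdx? evrHit with
  | none => simp
  | some i =>
    have hlt : i < lines.length := (List.findIdx?_eq_some_iff_findIdx_eq.mp hfi).1
    have hne : (lines.drop i).isEmpty = false := by
      simp [List.drop_eq_nil_iff]; omega
    simp [hne]

-- ===== VERDICT (by name: the statement is the Claim_ definition above) =====
theorem extract_variant_reference_spec : Claim_equal_extract_variant_reference := by
  intro adoc_text _
  exact evr_main ((PySem.Str.split? adoc_text "\n").getD [])
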